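-- pv_equiv track=rewrite | github.com/Abhik6/Python | 12. Hashmaps/greatest_number_product.py | greatest_product_equal_to_element
-- ===== SOURCE A (Python) =====
-- def greatest_product_equal_to_element(arr):
--     """
--     Function to find the greatest number in the array that is equal to the product of two different elements.
--
--     :param arr: List[int] -> The input list of integers
--     :return: int -> The greatest number in the array that is equal to the product of two different elements
--     """
--     # TODO: Implement the logic using a hashmap approach
--     num_map = {}
--     for index, elem in enumerate(arr):
--         num_map[elem] = index
--
--     max_product = -1
--     for i in range(len(arr)):
--         elem = arr[i]
--         for j in range(i+1, len(arr)):
--             product = elem*arr[j]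
--             if product in num_map:
--                 max_product = max(max_product, product)
--
--     return max_product
-- ===== SOURCE B (Python) =====
-- def greatest_product_equal_to_element(arr):
--     """
--     Greatest array element equal to the product of two elements at distinct
--     indices; -1 if there is none.  Instead of scanning all pairs and keeping a
--     running max, we count values once, then test candidate values from the
--     largest down by divisor lookup in the counter, returning the first hit.
--     """
--     cnt = {}
--     for x in arr:
--         cnt[x] = cnt.get(x, 0) + 1
--
--     def achievable(v):
--         if v == 0:
--             return 0 in cnt and len(arr) >= 2
--         for x, c in cnt.items():
--             if x != 0 and v % x == 0:
--                 q = v // x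
--                 if q == x:
--                     if c >= 2:
--                         return True
--                 elif q in cnt:
--                     return True
--         return False
--
--     for v in sorted(cnt, reverse=True):
--         if v <= -1:
--             break
--         if achievable(v):
--             return v
--     return -1
-- ===== Notes on version B (the rewrite author's own statement) =====
-- stated objective: faster
-- what changed: Instead of A's nested loop over all n^2/2 index pairs keeping a running max, B counts values once, then scans candidate values largest-first and tests each by an O(distinct) divisor lookup in the counter, returning at the first achievable candidate.
import Mathlib
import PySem

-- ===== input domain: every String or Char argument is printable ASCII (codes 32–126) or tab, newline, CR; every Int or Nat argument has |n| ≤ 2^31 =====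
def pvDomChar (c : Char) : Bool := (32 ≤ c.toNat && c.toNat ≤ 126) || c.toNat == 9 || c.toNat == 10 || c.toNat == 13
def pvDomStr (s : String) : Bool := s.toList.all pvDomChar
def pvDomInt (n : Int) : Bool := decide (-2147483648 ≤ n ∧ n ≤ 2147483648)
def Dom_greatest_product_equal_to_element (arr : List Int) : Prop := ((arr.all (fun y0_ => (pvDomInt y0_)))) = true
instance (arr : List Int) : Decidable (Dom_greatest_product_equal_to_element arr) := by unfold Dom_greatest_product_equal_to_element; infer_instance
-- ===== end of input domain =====

-- B replaces A's nested pair loop by a counter plus a largest-first scan of candidate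
-- values tested by divisor lookup (alternative decomposition; same exact result).

-- ===== PORT A =====
def greatest_product_equal_to_element (arr : List Int) : Int :=
  let num_map := (PySem.List.enumerate arr 0).foldl
    (fun d p => d.insert p.2 p.1) PySem.Dict.empty
  (PySem.List.pyRange 0 (arr.length : Int) 1).foldl (fun max_product i =>
    let elem := PySem.List.pyGetD arr i 0
    (PySem.List.pyRange (i + 1) (arr.length : Int) 1).foldl (fun max_product j =>
      let product := elem * PySem.List.pyGetD arr j 0
      if num_map.contains product then max max_product product else max_product)
      max_product) (-1)

-- ===== PORT B =====
def pvCounter (arr : List Int) : PySem.Dict Int Int :=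
  arr.foldl (fun d x => d.insert x (d.getD x 0 + 1)) PySem.Dict.empty

def pvAchievable (arr : List Int) (cnt : PySem.Dict Int Int) (v : Int) : Bool :=
  if v = 0 then cnt.contains 0 && decide (2 ≤ arr.length)
  else cnt.items.any (fun p =>
    if p.1 != 0 && (PySem.Int.mod v p.1 == 0) then
      let q := PySem.Int.floordiv v p.1
      if q == p.1 then decide (2 ≤ p.2) else cnt.contains q
    else false)

def pvScan (arr : List Int) (cnt : PySem.Dict Int Int) : List Int → Int
  | [] => -1
  | v :: rest =>
    if v ≤ -1 then -1
    else if pvAchievable arr cnt v then v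
    else pvScan arr cnt rest

def greatest_product_equal_to_element_alt (arr : List Int) : Int :=
  let cnt := pvCounter arr
  pvScan arr cnt (PySem.List.sorted cnt.keys (fun x => x) true)

-- ===== PRECONDITION & SPEC =====
def Spec_greatest_product_equal_to_element (arr : List Int) (out : Int) : Prop := out = greatest_product_equal_to_element_alt arr
instance (arr : List Int) (out : Int) : Decidable (Spec_greatest_product_equal_to_element arr out) := by unfold Spec_greatest_product_equal_to_element; infer_instance

-- ===== CLAIM (what is proved, stated in full; the proofs are below) =====
def Claim_equal_greatest_product_equal_to_element : Prop := ∀ (arr : List Int), Dom_greatest_product_equal_to_element arr → Spec_greatest_product_equal_to_element arr (greatest_product_equal_to_element arr)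

-- ===== LEMMAS AND PROOFS =====

-- products arr[i]*arr[j] over pairs i < j, structurally
def pairProducts : List Int → List Int
  | [] => []
  | x :: xs => xs.map (fun y => x * y) ++ pairProducts xs

-- v is a product of two elements at distinct indices
def Avail (arr : List Int) (v : Int) : Prop := ∃ x, x ∈ arr ∧ ∃ y, y ∈ arr.erase x ∧ v = x * y

-- structural form of A's nested loop
def aFold (arr : List Int) : List Int → Int → Int
  | [], acc => acc
  | x :: xs, acc =>
    aFold arr xs (xs.foldl (fun m y => if x * y ∈ arr then max m (x * y) else m) acc)

lemma numMap_contains (arr : List Int) (k : Int) :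
    ((PySem.List.enumerate arr 0).foldl (fun d p => d.insert p.2 p.1) PySem.Dict.empty).contains k
      = decide (k ∈ arr) := by
  rw [PySem.Dict.contains_eq_decide_mem_keys]
  rw [PySem.Dict.keys_foldl_insert_key (PySem.List.enumerate arr 0) (fun p => p.2)
    (fun d p => p.1) PySem.Dict.empty]
  simp [PySem.List.map_snd_enumerate, PySem.Set.update_nil_left, PySem.Set.mem_ofList,
    PySem.Dict.keys_empty]

lemma aLoop_eq (arr : List Int) (a : Int) (h : 0 ≤ a) (acc : Int) :
    (PySem.List.pyRange a (arr.length : Int) 1).foldl (fun m i =>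
      (PySem.List.pyRange (i + 1) (arr.length : Int) 1).foldl (fun m j =>
        if (PySem.List.pyGetD arr i 0) * (PySem.List.pyGetD arr j 0) ∈ arr
        then max m ((PySem.List.pyGetD arr i 0) * (PySem.List.pyGetD arr j 0)) else m) m) acc
      = aFold arr (arr.drop a.toNat) acc := by
  have key : ∀ (n : Nat) (a : Int), 0 ≤ a → arr.length - a.toNat = n → ∀ acc,
      (PySem.List.pyRange a (arr.length : Int) 1).foldl (fun m i =>
        (PySem.List.pyRange (i + 1) (arr.length : Int) 1).foldl (fun m j =>
          if (PySem.List.pyGetD arr i 0) * (PySem.List.pyGetD arr j 0) ∈ arr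
          then max m ((PySem.List.pyGetD arr i 0) * (PySem.List.pyGetD arr j 0)) else m) m) acc
        = aFold arr (arr.drop a.toNat) acc := by
    intro n
    induction n with
    | zero =>
      intro a ha hn acc
      have h1 : (arr.length : Int) ≤ a := by omega
      have h2 : arr.length ≤ a.toNat := by omega
      rw [PySem.List.pyRange_one_eq_nil h1, List.drop_of_length_le h2]
      rfl
    | succ n ih =>
      intro a ha hn acc
      have hlt : a < (arr.length : Int) := by omega
      rw [PySem.List.pyRange_one_cons hlt]
      rw [List.foldl_cons]
      rw [PySem.List.foldl_pyRange_pyGetD' arr 0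
        (fun m y => if (PySem.List.pyGetD arr a 0) * y ∈ arr
          then max m ((PySem.List.pyGetD arr a 0) * y) else m) acc
        (by omega : (0:Int) ≤ a + 1)]
      have h1 : (a + 1).toNat = a.toNat + 1 := by omega
      have hdrop : arr.drop a.toNat
          = PySem.List.pyGetD arr a 0 :: arr.drop (a.toNat + 1) := by
        rw [PySem.List.pyGetD_eq_getElem arr 0 ha hlt]
        exact List.drop_eq_getElem_cons (by omega)
      rw [ih (a + 1) (by omega) (by omega), h1, hdrop]
      rfl
  exact key (arr.length - a.toNat) a h rfl acc

lemma foldl_if_max (p : Int → Prop) [DecidablePred p] (f : Int → Int) (l : List Int) (acc : Int) :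
    l.foldl (fun m y => if p (f y) then max m (f y) else m) acc
      = ((l.map f).filter (fun z => decide (p z))).foldl max acc := by
  induction l generalizing acc with
  | nil => rfl
  | cons x xs ih =>
    simp only [List.foldl_cons, List.map_cons, List.filter_cons]
    by_cases hp : p (f x) <;> simp [hp, ih]

lemma aFold_eq (arr : List Int) (l : List Int) (acc : Int) :
    aFold arr l acc = ((pairProducts l).filter (fun p => decide (p ∈ arr))).foldl max acc := by
  induction l generalizing acc with
  | nil => rfl
  | cons x xs ih =>
    simp only [aFold, pairProducts, List.filter_append, List.foldl_append]
    rw [ih, foldl_if_max (fun z => z ∈ arr) (fun y => x * y) xs acc]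

lemma portA_eq (arr : List Int) :
    greatest_product_equal_to_element arr
      = ((pairProducts arr).filter (fun p => decide (p ∈ arr))).foldl max (-1) := by
  unfold greatest_product_equal_to_element
  simp only [numMap_contains, decide_eq_true_eq]
  rw [aLoop_eq arr 0 le_rfl (-1)]
  simp only [Int.toNat_zero, List.drop_zero]
  exact aFold_eq arr arr (-1)

lemma foldl_max_ge_init (l : List Int) (acc : Int) : acc ≤ l.foldl max acc := by
  induction l generalizing acc with
  | nil => exact le_rfl
  | cons x xs ih => exact le_trans (le_max_left acc x) (ih (max acc x))

lemma foldl_max_ge_mem (l : List Int) (acc x : Int) (h : x ∈ l) : x ≤ l.foldl max acc := by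
  induction l generalizing acc with
  | nil => cases h
  | cons y ys ih =>
    rcases List.mem_cons.mp h with rfl | hm
    · exact le_trans (le_max_right acc x) (foldl_max_ge_init ys (max acc x))
    · exact ih (max acc y) hm

lemma foldl_max_mem (l : List Int) (acc : Int) :
    l.foldl max acc = acc ∨ l.foldl max acc ∈ l := by
  induction l generalizing acc with
  | nil => exact Or.inl rfl
  | cons x xs ih =>
    rcases ih (max acc x) with h | h
    · rcases max_cases acc x with ⟨hm, _⟩ | ⟨hm, _⟩
      · exact Or.inl (by simpa [hm] using h)
      · refine Or.inr ?_
        rw [hm] at h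
        simp [List.foldl_cons, hm, h]
    · exact Or.inr (List.mem_cons_of_mem x h)

lemma count_ge_two_iff (l : List Int) (x : Int) : x ∈ l.erase x ↔ 2 ≤ l.count x := by
  rw [← List.count_pos_iff, List.count_erase_self]
  omega

lemma length_ge_two (l : List Int) (x y : Int) (hx : x ∈ l) (hy : y ∈ l.erase x) :
    2 ≤ l.length := by
  have h1 := List.length_erase_of_mem hx
  have h2 : 0 < (l.erase x).length := List.length_pos_of_mem hy
  omega

lemma mem_pairProducts (l : List Int) (v : Int) : v ∈ pairProducts l ↔ Avail l v := by
  induction l with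
  | nil => simp [pairProducts, Avail]
  | cons x xs ih =>
    simp only [pairProducts, List.mem_append]
    constructor
    · intro hv
      rcases hv with hm | hm
      · rcases List.mem_map.mp hm with ⟨y, hy, rfl⟩
        exact ⟨x, List.mem_cons_self, y, by rw [List.erase_cons_head]; exact hy, rfl⟩
      · rcases ih.mp hm with ⟨a, ha, b, hb, rfl⟩
        refine ⟨a, List.mem_cons_of_mem x ha, b, ?_, rfl⟩
        by_cases hax : a = x
        · subst hax; rw [List.erase_cons_head]; exact List.mem_of_mem_erase hb
        · rw [List.erase_cons_tail (by simpa using fun h => hax h.symm)]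
          exact List.mem_cons_of_mem x hb
    · rintro ⟨a, ha, b, hb, rfl⟩
      rcases List.mem_cons.mp ha with rfl | ha'
      · rw [List.erase_cons_head] at hb
        exact Or.inl (List.mem_map.mpr ⟨b, hb, rfl⟩)
      · by_cases hax : a = x
        · subst hax
          rw [List.erase_cons_head] at hb
          exact Or.inl (List.mem_map.mpr ⟨b, hb, rfl⟩)
        · rw [List.erase_cons_tail (by simpa using fun h => hax h.symm)] at hb
          rcases List.mem_cons.mp hb with rfl | hb'
          · exact Or.inl (List.mem_map.mpr ⟨a, ha', mul_comm b a⟩)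
          · exact Or.inr (ih.mpr ⟨a, ha', b, hb', rfl⟩)

lemma achievable_iff (arr : List Int) (v : Int) :
    pvAchievable arr (PySem.Dict.counter arr) v = true ↔ Avail arr v := by
  by_cases hv : v = 0
  · subst hv
    rw [pvAchievable, if_pos rfl]
    simp only [Bool.and_eq_true, decide_eq_true_eq, PySem.Dict.contains_counter,
      List.contains_eq_mem, decide_eq_true_eq]
    constructor
    · rintro ⟨h0, hlen⟩
      have hne : arr.erase 0 ≠ [] := by
        have := List.length_erase_of_mem h0
        intro he; rw [he] at this; simp at this; omega
      obtain ⟨y, hy⟩ := List.exists_mem_of_ne_nil _ hne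
      exact ⟨0, h0, y, hy, (zero_mul y).symm⟩
    · rintro ⟨x, hx, y, hy, hxy⟩
      rcases mul_eq_zero.mp hxy.symm with rfl | rfl
      · exact ⟨hx, length_ge_two arr 0 y hx hy⟩
      · exact ⟨List.mem_of_mem_erase hy, length_ge_two arr x 0 hx hy⟩
  · rw [pvAchievable, if_neg hv, List.any_eq_true]
    constructor
    · rintro ⟨p, hp, hcond⟩
      rw [PySem.Dict.items_counter] at hp
      obtain ⟨k, hk, rfl⟩ := List.mem_map.mp hp
      have hkarr : k ∈ arr := (PySem.Set.mem_ofList arr k).mp hk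
      by_cases hk0 : k = 0
      · simp [hk0] at hcond
      · by_cases hmod : PySem.Int.mod v k = 0
        · have hdvd : k ∣ v := (PySem.Int.mod_eq_zero_iff_dvd v k).mp hmod
          have hkq : k * PySem.Int.floordiv v k = v := by
            simpa [PySem.Int.floordiv] using Int.mul_fdiv_cancel' hdvd
          by_cases hq : PySem.Int.floordiv v k = k
          · simp [hk0, hmod, hq] at hcond
            have hc2 : 2 ≤ arr.count k := by exact_mod_cast hcond
            exact ⟨k, hkarr, k, (count_ge_two_iff arr k).mpr hc2, by rw [← hkq, hq]⟩
          · simp [hk0, hmod, hq, PySem.Dict.contains_counter, List.contains_eq_mem] at hcond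
            exact ⟨k, hkarr, PySem.Int.floordiv v k,
              (List.mem_erase_of_ne hq).mpr hcond, by rw [hkq]⟩
        · simp [hk0, hmod] at hcond
    · rintro ⟨x, hx, y, hy, rfl⟩
      have hx0 : x ≠ 0 := fun h => hv (by rw [h, zero_mul])
      have hq : PySem.Int.floordiv (x * y) x = y := by
        simpa [PySem.Int.floordiv] using Int.mul_fdiv_cancel_left y hx0
      have hmod : PySem.Int.mod (x * y) x = 0 :=
        (PySem.Int.mod_eq_zero_iff_dvd (x * y) x).mpr (dvd_mul_right x y)
      refine ⟨(x, (arr.count x : Int)),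
        by rw [PySem.Dict.items_counter]
           exact List.mem_map.mpr ⟨x, (PySem.Set.mem_ofList arr x).mpr hx, rfl⟩, ?_⟩
      by_cases hyx : y = x
      · subst hyx
        have hc2 : 2 ≤ arr.count y := (count_ge_two_iff arr y).mp hy
        simp [hx0, hmod, hq, hc2]
      · have hyarr : y ∈ arr := List.mem_of_mem_erase hy
        simp [hx0, hmod, hq, hyx, PySem.Dict.contains_counter, List.contains_eq_mem, hyarr]

lemma pvScan_spec (arr : List Int) (S : List Int) (hS : S.Pairwise (fun a b => b < a)) :
    (-1 ≤ pvScan arr (PySem.Dict.counter arr) S)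
    ∧ (pvScan arr (PySem.Dict.counter arr) S = -1
        ∨ (pvScan arr (PySem.Dict.counter arr) S ∈ S
            ∧ pvAchievable arr (PySem.Dict.counter arr) (pvScan arr (PySem.Dict.counter arr) S) = true))
    ∧ (∀ v ∈ S, pvAchievable arr (PySem.Dict.counter arr) v = true →
          v ≤ pvScan arr (PySem.Dict.counter arr) S) := by
  induction S with
  | nil => exact ⟨le_rfl, Or.inl rfl, by simp [pvScan]⟩
  | cons v rest ih =>
    obtain ⟨hlt, htail⟩ := List.pairwise_cons.mp hS
    by_cases h1 : v ≤ -1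
    · rw [pvScan, if_pos h1]
      refine ⟨le_rfl, Or.inl rfl, ?_⟩
      intro w hw _
      rcases List.mem_cons.mp hw with rfl | hm
      · exact h1
      · exact le_trans (le_of_lt (hlt w hm)) h1
    · by_cases h2 : pvAchievable arr (PySem.Dict.counter arr) v = true
      · rw [pvScan, if_neg h1, if_pos h2]
        refine ⟨by omega, Or.inr ⟨List.mem_cons_self, h2⟩, ?_⟩
        intro w hw _
        rcases List.mem_cons.mp hw with rfl | hm
        · exact le_rfl
        · exact le_of_lt (hlt w hm)
      · rw [pvScan, if_neg h1, if_neg h2]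
        obtain ⟨ia, ib, ic⟩ := ih htail
        refine ⟨ia, ?_, ?_⟩
        · rcases ib with h | ⟨hm, hach⟩
          · exact Or.inl h
          · exact Or.inr ⟨List.mem_cons_of_mem v hm, hach⟩
        · intro w hw hach
          rcases List.mem_cons.mp hw with rfl | hm
          · exact absurd hach h2
          · exact ic w hm hach

-- ===== VERDICT (by name: the statement is the Claim_ definition above) =====
theorem greatest_product_equal_to_element_spec : Claim_equal_greatest_product_equal_to_element := by
  intro arr _
  unfold Spec_greatest_product_equal_to_element
  rw [portA_eq]
  have hcnt : pvCounter arr = PySem.Dict.counter arr :=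
    PySem.Dict.foldl_insert_getD_add_one_eq_counter arr
  simp only [greatest_product_equal_to_element_alt, hcnt]
  set Q := (pairProducts arr).filter (fun p => decide (p ∈ arr)) with hQ
  set S := PySem.List.sorted (PySem.Dict.counter arr).keys (fun x => x) true with hSdef
  -- bridge between Q-membership and S-membership + achievability
  have hmemS : ∀ w : Int, w ∈ S ↔ w ∈ arr := by
    intro w
    rw [hSdef, (PySem.List.sorted_perm (PySem.Dict.counter arr).keys (fun x => x) true).mem_iff,
      PySem.Dict.keys_counter]
    exact PySem.Set.mem_ofList arr w
  have hQiff : ∀ w : Int, w ∈ Q ↔ (w ∈ S ∧ pvAchievable arr (PySem.Dict.counter arr) w = true) := by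
    intro w
    rw [hQ, List.mem_filter, decide_eq_true_eq, hmemS w, achievable_iff, mem_pairProducts,
      and_comm]
  -- S is strictly decreasing
  have hpw : S.Pairwise (fun a b => b < a) := by
    have hle : S.Pairwise (fun a b => b ≤ a) :=
      PySem.List.sorted_pairwise_rev (PySem.Dict.counter arr).keys (fun x => x)
    have hnd : S.Nodup := by
      rw [(PySem.List.sorted_perm (PySem.Dict.counter arr).keys (fun x => x) true).nodup_iff]
      exact PySem.Dict.nodup_keys_counter arr
    exact (hle.and hnd).imp (fun h => lt_of_le_of_ne h.1 h.2.symm)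
  obtain ⟨hge2, hmem2, hub2⟩ := pvScan_spec arr S hpw
  have hge1 : (-1 : Int) ≤ Q.foldl max (-1) := foldl_max_ge_init Q (-1)
  have hub1 : ∀ w ∈ Q, w ≤ Q.foldl max (-1) := fun w hw => foldl_max_ge_mem Q (-1) w hw
  have hmem1 := foldl_max_mem Q (-1)
  apply le_antisymm
  · rcases hmem1 with h | h
    · rw [h]; exact hge2
    · exact hub2 _ ((hQiff _).mp h).1 ((hQiff _).mp h).2
  · rcases hmem2 with h | h
    · rw [h]; exact hge1
    · exact hub1 _ ((hQiff _).mpr h)
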